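-- pv_equiv track=rewrite | github.com/KayvanShah1/usc-dsci553-data-mining-sp24 | assignment-2/solutions/task1.py | check_itemsets_in_basket
-- ===== SOURCE A (Python) =====
-- def check_itemsets_in_basket(baskets, candidates):
--     """
--     Check if candidate itemsets are frequent in the given baskets.
--
--     Parameters:
--         baskets (iterable): An iterable containing baskets of items.
--         candidates (iterable): An iterable containing candidate itemsets.
--
--     Returns:
--         frequent_itemsets (list): A list of frequent itemsets found in the baskets.
--     """
--     candidates = list(candidates)
--     frequent_itemsets = []
--
--     for basket in baskets:
--         for itemset in candidates:
--             # Check if the candidate itemset is a subset of the current basket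
--             if set(itemset).issubset(basket):
--                 frequent_itemsets.append(itemset)
--
--     return frequent_itemsets
-- ===== SOURCE B (Python) =====
-- def check_itemsets_in_basket(baskets, candidates):
--     baskets = list(baskets)
--     # candidate-major traversal over pre-built basket sets: scatter each
--     # candidate into per-basket buckets, then emit the buckets in basket order
--     basket_sets = [set(basket) for basket in baskets]
--     buckets = [[] for _ in baskets]
--     for itemset in candidates:
--         s = set(itemset)
--         for i, bset in enumerate(basket_sets):
--             if s <= bset:
--                 buckets[i].append(itemset)
--     return [itemset for bucket in buckets for itemset in bucket]
-- ===== Notes on version B (the rewrite author's own statement) =====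
-- stated objective: faster
-- what changed: Transposed the loop nest: B pre-builds each basket's set once and each candidate's set once, iterates candidate-major scattering matches into per-basket buckets, and flattens the buckets in basket order, instead of A's basket-major loop that rebuilds set(itemset) and re-converts the basket on every (basket,candidate) pair.
import Mathlib
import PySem

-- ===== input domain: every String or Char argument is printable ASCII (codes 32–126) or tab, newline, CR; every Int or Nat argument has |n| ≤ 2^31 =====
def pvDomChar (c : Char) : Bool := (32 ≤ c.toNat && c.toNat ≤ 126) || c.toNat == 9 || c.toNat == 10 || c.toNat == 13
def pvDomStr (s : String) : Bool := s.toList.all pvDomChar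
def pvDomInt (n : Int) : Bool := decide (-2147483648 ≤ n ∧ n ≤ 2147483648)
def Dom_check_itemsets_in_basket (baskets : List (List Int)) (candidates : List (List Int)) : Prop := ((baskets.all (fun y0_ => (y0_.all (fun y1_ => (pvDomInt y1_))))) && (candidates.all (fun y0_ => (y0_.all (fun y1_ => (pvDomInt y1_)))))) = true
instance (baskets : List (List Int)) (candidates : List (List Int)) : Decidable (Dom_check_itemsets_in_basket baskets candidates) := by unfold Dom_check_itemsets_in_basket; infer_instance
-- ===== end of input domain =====

-- B transposes the loop nest (candidate-major, per-basket buckets) and builds each basket's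
-- set and each candidate's set once instead of per (basket,candidate) pair.

-- ===== PORT A =====
-- A: for each basket, for each candidate, append the candidate if set(itemset).issubset(basket)
def check_itemsets_in_basket (baskets : List (List Int)) (candidates : List (List Int)) : List (List Int) :=
  baskets.foldl (fun freq basket =>
    candidates.foldl (fun freq itemset =>
      if PySem.Set.issubset (PySem.Set.ofList itemset) basket then freq ++ [itemset] else freq)
      freq) []

-- ===== PORT B =====
-- B: pre-build basket sets, scatter each candidate into the buckets of the baskets
-- containing it (candidate-major), then flatten the buckets in basket order
def check_itemsets_in_basket_alt (baskets : List (List Int)) (candidates : List (List Int)) : List (List Int) :=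
  let basketSets := baskets.map (fun basket => PySem.Set.ofList basket)
  let buckets := candidates.foldl (fun buckets itemset =>
      let s := PySem.Set.ofList itemset
      (buckets.zip basketSets).map (fun p => if PySem.Set.issubset s p.2 then p.1 ++ [itemset] else p.1))
    (baskets.map (fun _ => ([] : List (List Int))))
  buckets.flatten

-- ===== PRECONDITION & SPEC =====
def Spec_check_itemsets_in_basket (baskets : List (List Int)) (candidates : List (List Int)) (out : List (List Int)) : Prop := out = check_itemsets_in_basket_alt baskets candidates
instance (baskets : List (List Int)) (candidates : List (List Int)) (out : List (List Int)) : Decidable (Spec_check_itemsets_in_basket baskets candidates out) := by unfold Spec_check_itemsets_in_basket; infer_instance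

-- ===== CLAIM (what is proved, stated in full; the proofs are below) =====
def Claim_equal_check_itemsets_in_basket : Prop := ∀ (baskets : List (List Int)) (candidates : List (List Int)), Dom_check_itemsets_in_basket baskets candidates → Spec_check_itemsets_in_basket baskets candidates (check_itemsets_in_basket baskets candidates)

-- ===== LEMMAS AND PROOFS =====

-- the subset test against a basket equals the test against the basket's set
lemma test_ofList (s b : List Int) :
    PySem.Set.issubset s (PySem.Set.ofList b) = PySem.Set.issubset s b := by
  rcases h : PySem.Set.issubset s b with _ | _
  · rcases h2 : PySem.Set.issubset s (PySem.Set.ofList b) with _ | _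
    · rfl
    · rw [PySem.Set.issubset_iff] at h2
      simp only [PySem.Set.mem_ofList] at h2
      rw [← PySem.Set.issubset_iff] at h2
      rw [h] at h2; exact h2.symm
  · rw [PySem.Set.issubset_iff] at h ⊢
    simpa [PySem.Set.mem_ofList] using h

-- A's outer loop with a generalized accumulator
lemma a_aux (candidates : List (List Int)) (bs : List (List Int)) (acc : List (List Int)) :
    bs.foldl (fun freq basket =>
      candidates.foldl (fun freq itemset =>
        if PySem.Set.issubset (PySem.Set.ofList itemset) basket then freq ++ [itemset] else freq)
        freq) acc
    = acc ++ (bs.map (fun b =>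
        candidates.filter (fun its => PySem.Set.issubset (PySem.Set.ofList its) b))).flatten := by
  induction bs generalizing acc with
  | nil => simp
  | cons c cs ih2 =>
    simp only [List.foldl_cons, List.map_cons, List.flatten_cons]
    rw [ih2, PySem.List.foldl_append_if_eq_filter, List.append_assoc]

-- A's nest = flatten of per-basket filters
lemma a_shape (baskets candidates : List (List Int)) :
    check_itemsets_in_basket baskets candidates
      = (baskets.map (fun b =>
          candidates.filter (fun its => PySem.Set.issubset (PySem.Set.ofList its) b))).flatten := by
  unfold check_itemsets_in_basket
  rw [a_aux]; rfl

-- B's candidate-major fold, characterised with a generalized initial bucket state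
lemma b_fold (candidates baskets : List (List Int)) (f : List Int → List (List Int)) :
    candidates.foldl (fun buckets itemset =>
        (buckets.zip (baskets.map (fun basket => PySem.Set.ofList basket))).map
          (fun p => if PySem.Set.issubset (PySem.Set.ofList itemset) p.2 then p.1 ++ [itemset] else p.1))
      (baskets.map f)
      = baskets.map (fun b => f b ++
          candidates.filter (fun its => PySem.Set.issubset (PySem.Set.ofList its) (PySem.Set.ofList b))) := by
  induction candidates generalizing f with
  | nil => simp
  | cons its cs ih =>
    simp only [List.foldl_cons]
    have step : ((baskets.map f).zip (baskets.map (fun basket => PySem.Set.ofList basket))).map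
        (fun p => if PySem.Set.issubset (PySem.Set.ofList its) p.2 then p.1 ++ [its] else p.1)
        = baskets.map (fun b =>
            if PySem.Set.issubset (PySem.Set.ofList its) (PySem.Set.ofList b) then f b ++ [its] else f b) := by
      rw [List.zip_map', List.map_map]; rfl
    rw [step, ih]
    apply List.map_congr_left
    intro b _
    by_cases h : PySem.Set.issubset (PySem.Set.ofList its) (PySem.Set.ofList b) = true
    · simp [h, List.append_assoc]
    · simp only [Bool.not_eq_true] at h
      simp [h]

-- ===== VERDICT (by name: the statement is the Claim_ definition above) =====
theorem check_itemsets_in_basket_spec : Claim_equal_check_itemsets_in_basket := by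
  intro baskets candidates _
  unfold Spec_check_itemsets_in_basket
  rw [a_shape]
  simp only [check_itemsets_in_basket_alt]
  rw [b_fold candidates baskets (fun _ => ([] : List (List Int)))]
  simp only [List.nil_append, test_ofList]
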